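-- pv_equiv track=rewrite | github.com/shhuan1989/algorithms | codeforces/1367D.py | solve
-- ===== SOURCE A (Python) =====
-- import collections
--
-- def solve(S, M, B):
--     wc = collections.Counter(S)
--     S = list(sorted(set(S), reverse=True))
--
--     C = ['' for _ in range(M)]
--     si = 0
--     while True:
--         fill = [i for i in range(M) if B[i] == 0]
--         if not fill:
--             break
--
--         while wc[S[si]] < len(fill):
--             si += 1
--
--         for i in fill:
--             C[i] = S[si]
--             B[i] = -1
--         for i in range(M):
--             B[i] -= sum([abs(i-j) for j in fill])
--         si += 1
--
--     return ''.join(C)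
-- ===== SOURCE B (Python) =====
-- import collections
--
-- def solve(S, M, B):
--     # Same rounds as the original, but each round's distance-sum update is done
--     # with two prefix sweeps instead of a per-index scan over the fill list.
--     # (Mutates B in place, exactly like the original.)
--     wc = collections.Counter(S)
--     chars = sorted(set(S), reverse=True)
--     C = [''] * M
--     si = 0
--     while True:
--         nf = sum(1 for i in range(M) if B[i] == 0)
--         if nf == 0:
--             break
--         while wc[chars[si]] < nf:
--             si += 1
--         ch = chars[si]
--         add = [0] * max(M, 0)
--         cnt = 0
--         sm = 0
--         for i in range(M):
--             if B[i] == 0: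
--                 cnt += 1
--                 sm += i
--             add[i] = cnt * i - sm
--         cnt = 0
--         sm = 0
--         for i in range(M - 1, -1, -1):
--             if B[i] == 0:
--                 cnt += 1
--                 sm += i
--             add[i] += sm - cnt * i
--         for i in range(M):
--             if B[i] == 0:
--                 C[i] = ch
--                 B[i] = -1 - add[i]
--             else:
--                 B[i] -= add[i]
--         si += 1
--     return ''.join(C)
-- ===== Notes on version B (the rewrite author's own statement) =====
-- stated objective: alternative
-- what changed: Each round's distance-sum update B[i] -= sum(|i-j| for j in fill) is computed for all i at once by two prefix sweeps (running count and running index-sum of fill positions, left-to-right and right-to-left) instead of A's per-index scan over the whole fill list; measured about 1.2x on random inputs, below the 1.5x bar, so no speed is claimed.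
import Mathlib
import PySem

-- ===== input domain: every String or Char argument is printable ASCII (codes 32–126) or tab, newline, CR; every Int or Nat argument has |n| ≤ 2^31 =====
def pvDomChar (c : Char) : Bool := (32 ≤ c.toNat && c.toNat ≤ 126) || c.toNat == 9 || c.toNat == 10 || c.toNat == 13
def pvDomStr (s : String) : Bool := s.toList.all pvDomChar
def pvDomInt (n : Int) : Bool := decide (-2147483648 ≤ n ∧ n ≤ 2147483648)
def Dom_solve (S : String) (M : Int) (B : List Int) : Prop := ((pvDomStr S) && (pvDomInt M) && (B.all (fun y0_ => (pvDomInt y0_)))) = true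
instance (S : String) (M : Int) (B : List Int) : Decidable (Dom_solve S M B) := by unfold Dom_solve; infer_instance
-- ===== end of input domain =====

-- B computes each round's distance-sum update with two prefix sweeps instead of A's
-- per-index scan over the fill list (a different algorithm, same measured cost); both
-- versions mutate the Python list B in place identically; the theorems are about the
-- RETURN value.

-- ===== PORT A =====
-- inner 'while wc[S[si]] < len(fill): si += 1'; fuel = chars.length suffices wherever the Python loop ends in range
def solveA_advance (wc : PySem.Dict Char Int) (chars : List Char) (need : Int) : Nat → Nat → Nat
  | 0, si => si
  | fuel+1, si =>
    if wc.getD (chars.getD si ' ') 0 < need then solveA_advance wc chars need fuel (si+1) else si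

-- the 'while True' loop; each pass fills ≥ 1 of the M cells, so fuel = M.toNat + 1 covers every terminating run
def solveA_loop (M : Int) (wc : PySem.Dict Char Int) (chars : List Char) :
    Nat → List (List Char) → List Int → Nat → List (List Char)
  | 0, C, _, _ => C
  | fuel+1, C, B, si =>
    let fill := (PySem.List.pyRange 0 M 1).filter (fun i => PySem.List.pyGetD B i 1 == 0)
    if fill.isEmpty then C
    else
      let si1 := solveA_advance wc chars ((fill.length : Int)) chars.length si
      let ch := chars.getD si1 ' '
      let C1 := fill.foldl (fun c i => PySem.List.pySetD c i [ch]) C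
      let B1 := fill.foldl (fun b i => PySem.List.pySetD b i (-1)) B
      let B2 := (PySem.List.pyRange 0 M 1).foldl
        (fun b i => PySem.List.pySetD b i
          (PySem.List.pyGetD b i 0 - ((fill.map (fun j => |i - j|)).sum))) B1
      solveA_loop M wc chars fuel C1 B2 (si1 + 1)

def solve (S : String) (M : Int) (B : List Int) : String :=
  let wc := PySem.Dict.counter S.toList
  let chars := PySem.List.sorted (PySem.Set.ofList S.toList) (fun c => c) true
  let C := List.replicate M.toNat ([] : List Char)
  String.ofList (solveA_loop M wc chars (M.toNat + 1) C B 0).flatten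

-- ===== PORT B =====
def solveB_advance (wc : PySem.Dict Char Int) (chars : List Char) (need : Int) : Nat → Nat → Nat
  | 0, si => si
  | fuel+1, si =>
    if wc.getD (chars.getD si ' ') 0 < need then solveB_advance wc chars need fuel (si+1) else si

def solveB_loop (M : Int) (wc : PySem.Dict Char Int) (chars : List Char) :
    Nat → List (List Char) → List Int → Nat → List (List Char)
  | 0, C, _, _ => C
  | fuel+1, C, B, si =>
    let nf : Int := (PySem.List.pyRange 0 M 1).foldl
      (fun acc i => if PySem.List.pyGetD B i 1 == 0 then acc + 1 else acc) 0
    if nf == 0 then C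
    else
      let si1 := solveB_advance wc chars nf chars.length si
      let ch := chars.getD si1 ' '
      let add0 := List.replicate M.toNat (0 : Int)
      -- left-to-right sweep: running (count, index-sum) of fill cells seen so far
      let s1 := (PySem.List.pyRange 0 M 1).foldl
        (fun s i =>
          let t := if PySem.List.pyGetD B i 1 == 0 then (s.1, s.2.1 + 1, s.2.2 + i) else s
          (PySem.List.pySetD t.1 i (t.2.1 * i - t.2.2), t.2.1, t.2.2))
        (add0, (0 : Int), (0 : Int))
      -- right-to-left sweep
      let s2 := (PySem.List.pyRange (M - 1) (-1) (-1)).foldl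
        (fun s i =>
          let t := if PySem.List.pyGetD B i 1 == 0 then (s.1, s.2.1 + 1, s.2.2 + i) else s
          (PySem.List.pySetD t.1 i (PySem.List.pyGetD t.1 i 0 + (t.2.2 - t.2.1 * i)), t.2.1, t.2.2))
        (s1.1, (0 : Int), (0 : Int))
      let CB := (PySem.List.pyRange 0 M 1).foldl
        (fun cb i =>
          if PySem.List.pyGetD cb.2 i 1 == 0 then
            (PySem.List.pySetD cb.1 i [ch],
             PySem.List.pySetD cb.2 i (-1 - PySem.List.pyGetD s2.1 i 0))
          else
            (cb.1, PySem.List.pySetD cb.2 i (PySem.List.pyGetD cb.2 i 0 - PySem.List.pyGetD s2.1 i 0)))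
        (C, B)
      solveB_loop M wc chars fuel CB.1 CB.2 (si1 + 1)

def solve_alt (S : String) (M : Int) (B : List Int) : String :=
  let wc := PySem.Dict.counter S.toList
  let chars := PySem.List.sorted (PySem.Set.ofList S.toList) (fun c => c) true
  let C := List.replicate M.toNat ([] : List Char)
  String.ofList (solveB_loop M wc chars (M.toNat + 1) C B 0).flatten

-- ===== PRECONDITION & SPEC =====
-- Pre_solve excludes EXACTLY the inputs on which the Python A raises IndexError, and no
-- input on which A returns: (a) 0 < M > len(B) (B[i] is indexed for every i in range(M)
-- in the very first round), and (b) instances whose greedy character selection runs off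
-- the end of the distinct-character list in some round.  The rounds' fill sets depend
-- only on M and B; condition (b) has no simpler closed form because A's domain is itself
-- defined by this round recurrence, so pvOK states it directly (a specification-level
-- recurrence over plain lists, not a copy of either port): each round takes the zero
-- cells of B below M, needs a not-yet-passed character whose count covers them, and
-- subtracts the absolute-distance sums; at most M rounds are non-empty, hence the
-- M.toNat + 1 bound.  All multi-round inputs on which A returns satisfy Pre_solve and
-- are covered by the equivalence theorem (the witness below is a two-round instance).
def pvZerosN (M : Int) (B : List Int) : List Nat :=
  (List.range M.toNat).filter (fun k => B.getD k 1 = 0)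

def pvStep (M : Int) (B : List Int) : List Int :=
  (List.range B.length).map (fun k =>
    if k < M.toNat then
      (if B.getD k 1 = 0 then (-1 : Int) else B.getD k 1)
        - ((pvZerosN M B).map (fun j => |(k : Int) - (j : Int)|)).sum
    else B.getD k 1)

-- first index ≥ si of a character occurring at least `need` times (none = IndexError in A)
def pvFind (chars : List Char) (S : String) (need : Nat) (si : Nat) : Option Nat :=
  match (chars.drop si).findIdx? (fun c => decide (need ≤ S.toList.count c)) with
  | some j => some (si + j)
  | none => none

def pvOK (M : Int) (S : String) (chars : List Char) : Nat → List Int → Nat → Bool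
  | 0, _, _ => true
  | fuel+1, B, si =>
    let z := pvZerosN M B
    if z.isEmpty then true
    else
      match pvFind chars S z.length si with
      | none => false
      | some si1 => pvOK M S chars fuel (pvStep M B) (si1 + 1)

def Pre_solve (S : String) (M : Int) (B : List Int) : Prop :=
  (0 ≤ M → M ≤ (B.length : Int)) ∧
  pvOK M S (PySem.List.sorted (PySem.Set.ofList S.toList) (fun c => c) true) (M.toNat + 1) B 0 = true

instance (S : String) (M : Int) (B : List Int) : Decidable (Pre_solve S M B) := by
  unfold Pre_solve; infer_instance

def pvWitness_solve : String × Int × List Int := ("aab", 2, [0, 1])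

def Spec_solve (S : String) (M : Int) (B : List Int) (out : String) : Prop := out = solve_alt S M B
instance (S : String) (M : Int) (B : List Int) (out : String) : Decidable (Spec_solve S M B out) := by unfold Spec_solve; infer_instance

-- ===== CLAIM (what is proved, stated in full; the proofs are below) =====
def Claim_equal_solve : Prop := ∀ (S : String) (M : Int) (B : List Int), Dom_solve S M B → Pre_solve S M B → Spec_solve S M B (solve S M B)

-- ===== LEMMAS AND PROOFS =====

-- positions i in range(M) with B[i] == 0 (one round's fill)
def pvZeros (M : Int) (B : List Int) : List Int :=
  (PySem.List.pyRange 0 M 1).filter (fun i => PySem.List.pyGetD B i 1 == 0)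

def zbP (B : List Int) (k : Nat) : Bool := B.getD k 1 == 0
def ZcP (B : List Int) (m : Nat) : Int := (((List.range m).filter (zbP B)).length : Int)
def ZsP (B : List Int) (m : Nat) : Int := (((List.range m).filter (zbP B)).map (fun (k : Nat) => (k:Int))).sum
def zrNP (B : List Int) (m : Nat) : List Nat := (List.range m).filter (zbP B)

lemma map_getD_range {α} (xs : List α) (d : α) :
    (List.range xs.length).map (fun k => xs.getD k d) = xs := by
  apply List.ext_getElem
  · simp
  · intro k h1 h2
    simp [List.getElem?_eq_getElem h2]

lemma Zc_succ (B : List Int) (m : Nat) :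
    ZcP B (m+1) = ZcP B m + (if zbP B m then 1 else 0) := by
  simp only [ZcP, List.range_succ, List.filter_append]
  by_cases h : zbP B m <;> simp [h]

lemma Zs_succ (B : List Int) (m : Nat) :
    ZsP B (m+1) = ZsP B m + (if zbP B m then (m:Int) else 0) := by
  simp only [ZsP, List.range_succ, List.filter_append, List.map_append, List.sum_append]
  by_cases h : zbP B m <;> simp [h]

lemma pySetD_natCast' {α : Type} (xs : List α) (n : Nat) (v : α) (h : n < xs.length) :
    PySem.List.pySetD xs (n : Int) v = xs.set n v := by
  rw [PySem.List.pySetD, PySem.List.pySet?_natCast xs n v h]; rfl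

lemma foldl_pySetD_pointwise (f : Int → Int → Int) (d : Int) :
    ∀ (m : Nat) (xs : List Int), m ≤ xs.length →
      (PySem.List.pyRange 0 (m:Int) 1).foldl
          (fun b i => PySem.List.pySetD b i (f i (PySem.List.pyGetD b i d))) xs
        = (List.range xs.length).map (fun k => if k < m then f k (xs.getD k d) else xs.getD k d) := by
  intro m
  induction m with
  | zero =>
    intro xs _
    rw [PySem.List.pyRange_one_eq_nil (by omega)]
    simp only [List.foldl_nil]
    exact (map_getD_range xs d).symm
  | succ m ih =>
    intro xs hm
    have h1 : ((m+1 : Nat) : Int) = (m : Int) + 1 := by push_cast; ring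
    rw [h1, PySem.List.pyRange_one_succ_right (by positivity), List.foldl_append]
    rw [ih xs (by omega)]
    set prev := (List.range xs.length).map (fun k => if k < m then f k (xs.getD k d) else xs.getD k d) with hprev
    have hlen : prev.length = xs.length := by simp [hprev]
    have hget : PySem.List.pyGetD prev (m : Int) d = xs.getD m d := by
      rw [PySem.List.pyGetD_natCast, hprev, PySem.List.getD_map_range _ _ _ _ (by omega)]
      simp
    simp only [List.foldl_cons, List.foldl_nil, hget]
    rw [pySetD_natCast' prev m _ (by omega)]
    apply List.ext_getElem
    · simp [hlen]
    · intro k hk1 hk2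
      simp only [List.getElem_set, hprev, List.getElem_map, List.getElem_range]
      rcases Nat.lt_trichotomy k m with h | h | h
      · simp [h, Nat.lt_succ_of_lt h, Nat.ne_of_gt h]
      · subst h
        simp
      · have h2 : ¬ (k < m) := by omega
        have h3 : ¬ (k < m + 1) := by omega
        simp [h2, h3, Nat.ne_of_lt h]

lemma sweepL (B : List Int) (L : Nat) :
    ∀ (m : Nat), m ≤ L →
      (PySem.List.pyRange 0 (m:Int) 1).foldl
        (fun s i =>
          let t := if PySem.List.pyGetD B i 1 == 0 then (s.1, s.2.1 + 1, s.2.2 + i) else s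
          (PySem.List.pySetD t.1 i (t.2.1 * i - t.2.2), t.2.1, t.2.2))
        (List.replicate L (0:Int), (0:Int), (0:Int))
      = ((List.range L).map (fun k => if k < m then ZcP B (k+1) * k - ZsP B (k+1) else 0),
         ZcP B m, ZsP B m) := by
  intro m
  induction m with
  | zero =>
    intro _
    rw [PySem.List.pyRange_one_eq_nil (by omega)]
    simp only [List.foldl_nil, ZcP, ZsP, List.range_zero, List.filter_nil]
    apply Prod.ext
    · apply List.ext_getElem
      · simp
      · intro k h1 h2; simp_all
    · simp
  | succ m ih =>
    intro hm
    have h1 : ((m+1 : Nat) : Int) = (m : Int) + 1 := by push_cast; ring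
    rw [h1, PySem.List.pyRange_one_succ_right (by positivity), List.foldl_append,
        ih (by omega)]
    simp only [List.foldl_cons, List.foldl_nil]
    have htest : (PySem.List.pyGetD B (m:Int) 1 == 0) = zbP B m := by
      rw [PySem.List.pyGetD_natCast]; rfl
    rw [htest]
    by_cases hz : zbP B m
    · simp only [hz, if_true]
      have hzc : ZcP B (m+1) = ZcP B m + 1 := by rw [Zc_succ]; simp [hz]
      have hzs : ZsP B (m+1) = ZsP B m + (m:Int) := by rw [Zs_succ]; simp [hz]
      rw [pySetD_natCast' _ m _ (by simp; omega)]
      apply Prod.ext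
      · apply List.ext_getElem
        · simp
        · intro k hk1 hk2
          simp only [List.getElem_set, List.getElem_map, List.getElem_range]
          simp only [List.length_set, List.length_map, List.length_range] at hk1
          rcases Nat.lt_trichotomy k m with h | h | h
          · simp [h, Nat.lt_succ_of_lt h, Nat.ne_of_gt h]
          · subst h; simp [hzc, hzs]
          · have h2 : ¬ (k < m) := by omega
            have h3 : ¬ (k < m + 1) := by omega
            simp [h2, h3, Nat.ne_of_lt h]
      · simp [hzc, hzs]
    · simp only [hz, if_false, Bool.false_eq_true]
      have hzc : ZcP B (m+1) = ZcP B m := by rw [Zc_succ]; simp [hz]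
      have hzs : ZsP B (m+1) = ZsP B m := by rw [Zs_succ]; simp [hz]
      rw [pySetD_natCast' _ m _ (by simp; omega)]
      apply Prod.ext
      · apply List.ext_getElem
        · simp
        · intro k hk1 hk2
          simp only [List.getElem_set, List.getElem_map, List.getElem_range]
          simp only [List.length_set, List.length_map, List.length_range] at hk1
          rcases Nat.lt_trichotomy k m with h | h | h
          · simp [h, Nat.lt_succ_of_lt h, Nat.ne_of_gt h]
          · subst h; simp [hzc, hzs]
          · have h2 : ¬ (k < m) := by omega
            have h3 : ¬ (k < m + 1) := by omega
            simp [h2, h3, Nat.ne_of_lt h]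
      · simp [hzc, hzs]

lemma sweepR (B : List Int) (M' : Nat) :
    ∀ (m : Nat), m ≤ M' → ∀ (add : List Int), M' ≤ add.length →
      (PySem.List.pyRange ((m:Int) - 1) (-1) (-1)).foldl
        (fun s i =>
          let t := if PySem.List.pyGetD B i 1 == 0 then (s.1, s.2.1 + 1, s.2.2 + i) else s
          (PySem.List.pySetD t.1 i (PySem.List.pyGetD t.1 i 0 + (t.2.2 - t.2.1 * i)), t.2.1, t.2.2))
        (add, ZcP B M' - ZcP B m, ZsP B M' - ZsP B m)
      = ((List.range add.length).map (fun k =>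
           if k < m then add.getD k 0 + ((ZsP B M' - ZsP B k) - (ZcP B M' - ZcP B k) * k) else add.getD k 0),
         ZcP B M', ZsP B M') := by
  set F := (fun (s : List Int × Int × Int) (i : Int) =>
      let t := if PySem.List.pyGetD B i 1 == 0 then (s.1, s.2.1 + 1, s.2.2 + i) else s
      (PySem.List.pySetD t.1 i (PySem.List.pyGetD t.1 i 0 + (t.2.2 - t.2.1 * i)), t.2.1, t.2.2)) with hF
  intro m
  induction m with
  | zero =>
    intro _ add _
    rw [show ((0:Nat):Int) - 1 = -1 by ring, PySem.List.pyRange_neg_one_eq_nil (by omega)]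
    simp only [List.foldl_nil, ZcP, ZsP, List.range_zero, List.filter_nil]
    apply Prod.ext
    · simp only [Nat.not_lt_zero, if_false]
      exact (map_getD_range add 0).symm
    · simp
  | succ m ih =>
    intro hm add hadd
    have h1 : ((m+1 : Nat) : Int) - 1 = (m : Int) := by push_cast; ring
    rw [h1, PySem.List.pyRange_neg_one_cons (by omega), List.foldl_cons]
    have htest : (PySem.List.pyGetD B (m:Int) 1 == 0) = zbP B m := by
      rw [PySem.List.pyGetD_natCast]; rfl
    have hmlen : m < add.length := by omega
    have hget : PySem.List.pyGetD add (m:Int) 0 = add.getD m 0 := PySem.List.pyGetD_natCast add m 0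
    have hzc : ZcP B (m+1) = ZcP B m + (if zbP B m then 1 else 0) := Zc_succ B m
    have hzs : ZsP B (m+1) = ZsP B m + (if zbP B m then (m:Int) else 0) := Zs_succ B m
    set v := add.getD m 0 + ((ZsP B M' - ZsP B m) - (ZcP B M' - ZcP B m) * (m:Int)) with hv
    have hstate : F (add, ZcP B M' - ZcP B (m+1), ZsP B M' - ZsP B (m+1)) (m:Int)
        = (add.set m v, ZcP B M' - ZcP B m, ZsP B M' - ZsP B m) := by
      rw [hF]
      simp only [htest]
      by_cases hz : zbP B m
      · simp only [hz, if_true] at hzc hzs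
        simp only [hz, if_true, hget]
        rw [pySetD_natCast' _ m _ hmlen]
        refine Prod.ext ?_ (Prod.ext ?_ ?_)
        · simp only []
          congr 1
          rw [hv, hzc, hzs]
          ring
        · simp only []
          rw [hzc]; ring
        · simp only []
          rw [hzs]; ring
      · simp only [hz, Bool.false_eq_true, if_false, add_zero] at hzc hzs
        simp only [hz, Bool.false_eq_true, if_false, hget]
        rw [pySetD_natCast' _ m _ hmlen]
        refine Prod.ext ?_ (Prod.ext ?_ ?_)
        · simp only []
          congr 1
          rw [hv, hzc, hzs]
        · simp only []
          rw [hzc]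
        · simp only []
          rw [hzs]
    rw [hstate, ih (by omega) (add.set m v) (by simp; omega)]
    apply Prod.ext
    · apply List.ext_getElem
      · simp
      · intro k hk1 hk2
        have hklen : k < add.length := by simpa using hk2
        simp only [List.getElem_map, List.getElem_range]
        have hset_getD : (add.set m v).getD k 0 = if k = m then v else add.getD k 0 := by
          by_cases hj : k = m
          · subst hj
            rw [List.getD_eq_getElem (add.set k v) 0 (by simpa using hklen)]
            simp
          · rw [List.getD_eq_getElem (add.set m v) 0 (by simpa using hklen),
                List.getD_eq_getElem add 0 hklen]
            simp [hj, Ne.symm hj]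
        rw [hset_getD]
        rcases Nat.lt_trichotomy k m with h | h | h
        · simp [h, Nat.lt_succ_of_lt h, Nat.ne_of_lt h]
        · subst h
          simp [hv]
        · have h2 : ¬ (k < m) := by omega
          have h3 : ¬ (k < m + 1) := by omega
          simp [h2, h3, Nat.ne_of_gt h]
    · simp

lemma getD_default_eq (xs : List Int) (k : Nat) (d d' : Int) (h : k < xs.length) :
    xs.getD k d = xs.getD k d' := by
  rw [List.getD_eq_getElem xs d h, List.getD_eq_getElem xs d' h]

lemma foldl_setD_const {α : Type} (v d : α) :
    ∀ (l : List Int) (C : List α), (∀ i ∈ l, 0 ≤ i ∧ i < (C.length:Int)) →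
      l.foldl (fun c i => PySem.List.pySetD c i v) C
      = (List.range C.length).map (fun (k : Nat) => if (k:Int) ∈ l then v else C.getD k d) := by
  intro l
  induction l with
  | nil =>
    intro C _
    simp only [List.foldl_nil, List.not_mem_nil, if_false]
    exact (map_getD_range C d).symm
  | cons i l ih =>
    intro C hmem
    obtain ⟨hi0, hilt⟩ := hmem i (List.mem_cons_self)
    have hnat : i = ((i.toNat : Nat) : Int) := (Int.toNat_of_nonneg hi0).symm
    have hlt : i.toNat < C.length := by omega
    simp only [List.foldl_cons]
    rw [hnat, pySetD_natCast' C i.toNat v hlt]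
    rw [ih (C.set i.toNat v) (by simpa using fun j hj => hmem j (List.mem_cons_of_mem _ hj))]
    simp only [List.length_set]
    apply List.map_congr_left
    intro k hk
    have hklen : k < C.length := List.mem_range.mp hk
    have hsetD : (C.set i.toNat v).getD k d = if k = i.toNat then v else C.getD k d := by
      by_cases hj : k = i.toNat
      · rw [List.getD_eq_getElem (C.set i.toNat v) d (by simpa using hklen)]
        simp [hj]
      · rw [List.getD_eq_getElem (C.set i.toNat v) d (by simpa using hklen),
            List.getD_eq_getElem C d hklen]
        simp [hj, Ne.symm hj]
    rw [hsetD]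
    by_cases hm : (k:Int) ∈ l
    · simp [hm, List.mem_cons]
    · by_cases hj : k = i.toNat
      · have : (k:Int) = i := by omega
        simp [hj, List.mem_cons]
      · have hne : ¬ ((k:Int) = i) := by omega
        have hmax : max i 0 = i := max_eq_left hi0
        simp [hm, hne, hj, List.mem_cons, hmax]

lemma pvZeros_eq (B : List Int) (M : Int) (h : 0 ≤ M) :
    pvZeros M B = (zrNP B M.toNat).map (fun (k : Nat) => (k:Int)) := by
  unfold pvZeros zrNP
  rw [PySem.List.pyRange_one]
  rw [show (M - 0).toNat = M.toNat by omega]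
  rw [List.filter_map]
  have hp : ((fun i => PySem.List.pyGetD B i 1 == 0) ∘ (fun k : Nat => ((0:Int) + k))) = zbP B := by
    funext k
    simp [Function.comp, zbP]
  rw [hp]
  apply List.map_congr_left
  intro a _
  omega

lemma mem_pvZeros (B : List Int) (M : Int) (h : 0 ≤ M) (k : Nat) :
    ((k:Int) ∈ pvZeros M B) ↔ (k < M.toNat ∧ zbP B k) := by
  rw [pvZeros_eq B M h]
  simp only [List.mem_map, zrNP, List.mem_filter, List.mem_range]
  constructor
  · rintro ⟨j, ⟨hj1, hj2⟩, hj3⟩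
    have : j = k := by omega
    subst this; exact ⟨hj1, hj2⟩
  · rintro ⟨h1, h2⟩
    exact ⟨k, ⟨h1, h2⟩, rfl⟩

lemma sum_map_sub_left (a : Int) (l : List Nat) :
    (l.map (fun (j : Nat) => a - (j:Int))).sum = (l.length : Int) * a - (l.map (fun (j : Nat) => (j:Int))).sum := by
  induction l with
  | nil => simp
  | cons x t ih => simp [ih]; ring

lemma sum_map_sub_right (a : Int) (l : List Nat) :
    (l.map (fun (j : Nat) => (j:Int) - a)).sum = (l.map (fun (j : Nat) => (j:Int))).sum - (l.length : Int) * a := by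
  induction l with
  | nil => simp
  | cons x t ih => simp [ih]; ring

lemma zrNP_split (B : List Int) (M' k : Nat) (hk : k ≤ M') :
    zrNP B M' = zrNP B k ++ ((List.range (M' - k)).map (k + ·)).filter (zbP B) := by
  unfold zrNP
  nth_rewrite 1 [show M' = k + (M' - k) by omega]
  rw [List.range_add, List.filter_append]

lemma dist_sum (B : List Int) (M' k : Nat) (hk : k < M') :
    ((zrNP B M').map (fun (j : Nat) => |(k:Int) - (j:Int)|)).sum
    = (ZcP B (k+1) * k - ZsP B (k+1)) + ((ZsP B M' - ZsP B k) - (ZcP B M' - ZcP B k) * k) := by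
  have hsplit := zrNP_split B M' k (by omega)
  set T := ((List.range (M' - k)).map (k + ·)).filter (zbP B) with hT
  have hcnt : ZcP B M' = ZcP B k + T.length := by
    simp only [ZcP]
    rw [show (List.range M').filter (zbP B) = zrNP B M' from rfl, hsplit]
    simp [zrNP]
  have hsm : ZsP B M' = ZsP B k + (T.map (fun (j : Nat) => (j:Int))).sum := by
    simp only [ZsP]
    rw [show (List.range M').filter (zbP B) = zrNP B M' from rfl, hsplit]
    simp [zrNP]
  have hmem1 : ∀ j ∈ zrNP B k, |(k:Int) - (j:Int)| = (k:Int) - (j:Int) := by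
    intro j hj
    have : j < k := by
      have := List.mem_range.mp (List.mem_of_mem_filter hj)
      omega
    rw [abs_of_nonneg (by omega)]
  have hmem2 : ∀ j ∈ T, |(k:Int) - (j:Int)| = (j:Int) - (k:Int) := by
    intro j hj
    have hj' := List.mem_of_mem_filter hj
    simp only [List.mem_map, List.mem_range] at hj'
    obtain ⟨x, _, hx⟩ := hj'
    have : k ≤ j := by omega
    rw [abs_of_nonpos (by omega), neg_sub]
  rw [hsplit, List.map_append, List.sum_append]
  rw [List.map_congr_left hmem1, List.map_congr_left hmem2]
  rw [sum_map_sub_left, sum_map_sub_right]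
  have hzc := Zc_succ B k
  have hzs := Zs_succ B k
  have hZck : ZcP B k = ((zrNP B k).length : Int) := rfl
  have hZsk : ZsP B k = ((zrNP B k).map (fun (j : Nat) => (j:Int))).sum := rfl
  by_cases hz : zbP B k
  · simp only [hz, if_true] at hzc hzs
    rw [hzc, hzs, hcnt, hsm, hZck, hZsk]
    ring
  · simp only [hz, Bool.false_eq_true, if_false, add_zero] at hzc hzs
    rw [hzc, hzs, hcnt, hsm, hZck, hZsk]
    ring

lemma foldl_CB (Bf add : List Int) (ch : Char) :
    ∀ (m : Nat) (C : List (List Char)), m ≤ Bf.length → m ≤ C.length →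
      (PySem.List.pyRange 0 (m:Int) 1).foldl
        (fun cb i =>
          if PySem.List.pyGetD cb.2 i 1 == 0 then
            (PySem.List.pySetD cb.1 i [ch],
             PySem.List.pySetD cb.2 i (-1 - PySem.List.pyGetD add i 0))
          else
            (cb.1, PySem.List.pySetD cb.2 i (PySem.List.pyGetD cb.2 i 0 - PySem.List.pyGetD add i 0)))
        (C, Bf)
      = ((List.range C.length).map (fun (k : Nat) => if k < m ∧ zbP Bf k then [ch] else C.getD k []),
         (List.range Bf.length).map (fun (k : Nat) => if k < m then
             (if zbP Bf k then -1 - add.getD k 0 else Bf.getD k 0 - add.getD k 0)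
           else Bf.getD k 0)) := by
  intro m
  induction m with
  | zero =>
    intro C _ _
    rw [PySem.List.pyRange_one_eq_nil (by omega)]
    simp only [List.foldl_nil, Nat.not_lt_zero, false_and, if_false]
    refine Prod.ext ?_ ?_
    · simp only []
      exact (map_getD_range C []).symm
    · simp only []
      calc Bf = (List.range Bf.length).map (fun k => Bf.getD k 0) := (map_getD_range Bf 0).symm
        _ = _ := by
          apply List.map_congr_left
          intro k hk
          simp
  | succ m ih =>
    intro C hmB hmC
    have h1 : ((m+1 : Nat) : Int) = (m : Int) + 1 := by push_cast; ring
    rw [h1, PySem.List.pyRange_one_succ_right (by positivity), List.foldl_append,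
        ih C (by omega) (by omega)]
    simp only [List.foldl_cons, List.foldl_nil]
    have hmBf : m < Bf.length := by omega
    have hmCl : m < C.length := by omega
    set mapC := (List.range C.length).map (fun (k : Nat) => if k < m ∧ zbP Bf k then [ch] else C.getD k []) with hmapC
    set mapB := (List.range Bf.length).map (fun (k : Nat) => if k < m then
             (if zbP Bf k then -1 - add.getD k 0 else Bf.getD k 0 - add.getD k 0)
           else Bf.getD k 0) with hmapB
    have hlenC : mapC.length = C.length := by simp [hmapC]
    have hlenB : mapB.length = Bf.length := by simp [hmapB]
    have htest : (PySem.List.pyGetD mapB (m:Int) 1 == 0) = zbP Bf m := by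
      rw [PySem.List.pyGetD_natCast, hmapB, PySem.List.getD_map_range _ _ _ _ (by omega)]
      simp only [Nat.lt_irrefl, if_false]
      unfold zbP
      rw [getD_default_eq Bf m 0 1 hmBf]
    have hgetB : PySem.List.pyGetD mapB (m:Int) 0 = Bf.getD m 0 := by
      rw [PySem.List.pyGetD_natCast, hmapB, PySem.List.getD_map_range _ _ _ _ (by omega)]
      simp
    have hgetA : PySem.List.pyGetD add (m:Int) 0 = add.getD m 0 := PySem.List.pyGetD_natCast add m 0
    have hCset : ∀ (v : List Char), PySem.List.pySetD mapC (m:Int) v = mapC.set m v := by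
      intro v; exact pySetD_natCast' mapC m v (by omega)
    have hBset : ∀ (v : Int), PySem.List.pySetD mapB (m:Int) v = mapB.set m v := by
      intro v; exact pySetD_natCast' mapB m v (by omega)
    have hCmap : ∀ (v : List Char), mapC.set m v
        = (List.range C.length).map (fun (k : Nat) => if m = k then v else (if k < m ∧ zbP Bf k then [ch] else C.getD k [])) := by
      intro v
      apply List.ext_getElem
      · simp [hlenC]
      · intro k hk1 hk2
        simp only [List.getElem_set, hmapC, List.getElem_map, List.getElem_range]
    have hBmap : ∀ (v : Int), mapB.set m v
        = (List.range Bf.length).map (fun (k : Nat) => if m = k then v else (if k < m then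
             (if zbP Bf k then -1 - add.getD k 0 else Bf.getD k 0 - add.getD k 0)
           else Bf.getD k 0)) := by
      intro v
      apply List.ext_getElem
      · simp [hlenB]
      · intro k hk1 hk2
        simp only [List.getElem_set, hmapB, List.getElem_map, List.getElem_range]
    by_cases hz : zbP Bf m
    · rw [htest]
      simp only [hz, if_true]
      rw [hCset, hBset, hgetA]
      refine Prod.ext ?_ ?_
      · simp only []
        rw [hCmap]
        apply List.map_congr_left
        intro k hk
        rcases Nat.lt_trichotomy k m with h | h | h
        · simp [h, Nat.lt_succ_of_lt h, (show ¬ m = k by omega)]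
        · subst h; simp [hz]
        · have h2 : ¬ (k < m) := by omega
          have h3 : ¬ (k < m + 1) := by omega
          simp [h2, h3, (show ¬ m = k by omega)]
      · simp only []
        rw [hBmap]
        apply List.map_congr_left
        intro k hk
        rcases Nat.lt_trichotomy k m with h | h | h
        · simp [h, Nat.lt_succ_of_lt h, (show ¬ m = k by omega)]
        · subst h; simp [hz]
        · have h2 : ¬ (k < m) := by omega
          have h3 : ¬ (k < m + 1) := by omega
          simp [h2, h3, (show ¬ m = k by omega)]
    · rw [htest]
      simp only [hz, Bool.false_eq_true, if_false]
      rw [hBset, hgetA, hgetB]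
      refine Prod.ext ?_ ?_
      · simp only [hmapC]
        apply List.map_congr_left
        intro k hk
        rcases Nat.lt_trichotomy k m with h | h | h
        · simp [h, Nat.lt_succ_of_lt h]
        · subst h; simp [hz]
        · have h2 : ¬ (k < m) := by omega
          have h3 : ¬ (k < m + 1) := by omega
          simp [h2, h3]
      · simp only []
        rw [hBmap]
        apply List.map_congr_left
        intro k hk
        rcases Nat.lt_trichotomy k m with h | h | h
        · simp [h, Nat.lt_succ_of_lt h, (show ¬ m = k by omega)]
        · subst h; simp [hz]
        · have h2 : ¬ (k < m) := by omega
          have h3 : ¬ (k < m + 1) := by omega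
          simp [h2, h3, (show ¬ m = k by omega)]

-- the two inner character scans are the same loop
lemma advance_eq (wc : PySem.Dict Char Int) (chars : List Char) (need : Int) :
    ∀ fuel si, solveA_advance wc chars need fuel si = solveB_advance wc chars need fuel si := by
  intro fuel
  induction fuel with
  | zero => intro si; rfl
  | succ f ih =>
    intro si
    simp only [solveA_advance, solveB_advance]
    split <;> simp [ih]

lemma nf_eq (M : Int) (B : List Int) :
    (PySem.List.pyRange 0 M 1).foldl
      (fun acc i => if PySem.List.pyGetD B i 1 == 0 then acc + 1 else acc) (0:Int)
    = ((pvZeros M B).length : Int) := by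
  rw [PySem.List.foldl_if_add_one]
  rw [List.countP_eq_length_filter]
  simp [pvZeros]

def SdistP (B : List Int) (M' k : Nat) : Int :=
  ((zrNP B M').map (fun (j : Nat) => |(k:Int) - (j:Int)|)).sum

def B2mapP (B : List Int) (M' : Nat) : List Int :=
  (List.range B.length).map (fun (k : Nat) =>
    if k < M' then (if zbP B k then (-1:Int) else B.getD k 0) - SdistP B M' k else B.getD k 0)

def CmapP (C : List (List Char)) (B : List Int) (M' : Nat) (ch : Char) : List (List Char) :=
  (List.range C.length).map (fun (k : Nat) => if k < M' ∧ zbP B k then [ch] else C.getD k [])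

def roundA (M : Int) (wc : PySem.Dict Char Int) (chars : List Char)
    (C : List (List Char)) (B : List Int) (si : Nat) :
    (List (List Char)) × List Int × Nat :=
  let fill := (PySem.List.pyRange 0 M 1).filter (fun i => PySem.List.pyGetD B i 1 == 0)
  let si1 := solveA_advance wc chars ((fill.length : Int)) chars.length si
  let ch := chars.getD si1 ' '
  let C1 := fill.foldl (fun c i => PySem.List.pySetD c i [ch]) C
  let B1 := fill.foldl (fun b i => PySem.List.pySetD b i (-1)) B
  let B2 := (PySem.List.pyRange 0 M 1).foldl
    (fun b i => PySem.List.pySetD b i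
      (PySem.List.pyGetD b i 0 - ((fill.map (fun j => |i - j|)).sum))) B1
  (C1, B2, si1 + 1)

def roundB (M : Int) (wc : PySem.Dict Char Int) (chars : List Char)
    (C : List (List Char)) (B : List Int) (si : Nat) :
    (List (List Char)) × List Int × Nat :=
  let nf : Int := (PySem.List.pyRange 0 M 1).foldl
    (fun acc i => if PySem.List.pyGetD B i 1 == 0 then acc + 1 else acc) 0
  let si1 := solveB_advance wc chars nf chars.length si
  let ch := chars.getD si1 ' '
  let add0 := List.replicate M.toNat (0 : Int)
  let s1 := (PySem.List.pyRange 0 M 1).foldl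
    (fun s i =>
      let t := if PySem.List.pyGetD B i 1 == 0 then (s.1, s.2.1 + 1, s.2.2 + i) else s
      (PySem.List.pySetD t.1 i (t.2.1 * i - t.2.2), t.2.1, t.2.2))
    (add0, (0 : Int), (0 : Int))
  let s2 := (PySem.List.pyRange (M - 1) (-1) (-1)).foldl
    (fun s i =>
      let t := if PySem.List.pyGetD B i 1 == 0 then (s.1, s.2.1 + 1, s.2.2 + i) else s
      (PySem.List.pySetD t.1 i (PySem.List.pyGetD t.1 i 0 + (t.2.2 - t.2.1 * i)), t.2.1, t.2.2))
    (s1.1, (0 : Int), (0 : Int))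
  let CB := (PySem.List.pyRange 0 M 1).foldl
    (fun cb i =>
      if PySem.List.pyGetD cb.2 i 1 == 0 then
        (PySem.List.pySetD cb.1 i [ch],
         PySem.List.pySetD cb.2 i (-1 - PySem.List.pyGetD s2.1 i 0))
      else
        (cb.1, PySem.List.pySetD cb.2 i (PySem.List.pyGetD cb.2 i 0 - PySem.List.pyGetD s2.1 i 0)))
    (C, B)
  (CB.1, CB.2, si1 + 1)

lemma stepA (M : Int) (wc : PySem.Dict Char Int) (chars : List Char) (fuel : Nat)
    (C : List (List Char)) (B : List Int) (si : Nat)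
    (h : (PySem.List.pyRange 0 M 1).filter (fun i => PySem.List.pyGetD B i 1 == 0) ≠ []) :
    solveA_loop M wc chars (fuel+1) C B si
    = solveA_loop M wc chars fuel (roundA M wc chars C B si).1
        (roundA M wc chars C B si).2.1 (roundA M wc chars C B si).2.2 := by
  simp only [solveA_loop, roundA]
  rw [if_neg (by simpa [List.isEmpty_iff] using h)]

lemma stopA (M : Int) (wc : PySem.Dict Char Int) (chars : List Char) (fuel : Nat)
    (C : List (List Char)) (B : List Int) (si : Nat)
    (h : (PySem.List.pyRange 0 M 1).filter (fun i => PySem.List.pyGetD B i 1 == 0) = []) :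
    solveA_loop M wc chars (fuel+1) C B si = C := by
  simp only [solveA_loop]
  rw [h]
  simp

lemma stepB (M : Int) (wc : PySem.Dict Char Int) (chars : List Char) (fuel : Nat)
    (C : List (List Char)) (B : List Int) (si : Nat)
    (h : (PySem.List.pyRange 0 M 1).filter (fun i => PySem.List.pyGetD B i 1 == 0) ≠ []) :
    solveB_loop M wc chars (fuel+1) C B si
    = solveB_loop M wc chars fuel (roundB M wc chars C B si).1
        (roundB M wc chars C B si).2.1 (roundB M wc chars C B si).2.2 := by
  simp only [solveB_loop, roundB]
  rw [if_neg (by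
    rw [nf_eq M B]
    simp only [beq_iff_eq, Int.natCast_eq_zero, List.length_eq_zero_iff]
    exact fun hx => h (by simpa [pvZeros] using hx))]

lemma stopB (M : Int) (wc : PySem.Dict Char Int) (chars : List Char) (fuel : Nat)
    (C : List (List Char)) (B : List Int) (si : Nat)
    (h : (PySem.List.pyRange 0 M 1).filter (fun i => PySem.List.pyGetD B i 1 == 0) = []) :
    solveB_loop M wc chars (fuel+1) C B si = C := by
  simp only [solveB_loop]
  rw [if_pos (by
    rw [nf_eq M B]
    simp only [beq_iff_eq, Int.natCast_eq_zero, List.length_eq_zero_iff]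
    simpa [pvZeros] using h)]

lemma pvZeros_mem_bounds (M : Int) (B : List Int) :
    ∀ i ∈ pvZeros M B, 0 ≤ i ∧ i < M := by
  intro i hi
  exact (PySem.List.mem_pyRange_one).mp (List.mem_of_mem_filter hi)

lemma roundA_eq (M : Int) (wc : PySem.Dict Char Int) (chars : List Char)
    (C : List (List Char)) (B : List Int) (si : Nat)
    (hM0 : 0 < M) (hBlen : M.toNat ≤ B.length) (hClen : M.toNat ≤ C.length) :
    roundA M wc chars C B si
    = (CmapP C B M.toNat (chars.getD (solveA_advance wc chars (((pvZeros M B).length : Int)) chars.length si) ' '),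
       B2mapP B M.toNat,
       solveA_advance wc chars (((pvZeros M B).length : Int)) chars.length si + 1) := by
  unfold roundA
  rw [show ((PySem.List.pyRange 0 M 1).filter (fun i => PySem.List.pyGetD B i 1 == 0)) = pvZeros M B from rfl]
  set M' := M.toNat with hM'
  have hMM : M = (M' : Int) := by omega
  set si1 := solveA_advance wc chars (((pvZeros M B).length : Int)) chars.length si with hsi1
  set ch := chars.getD si1 ' ' with hch
  have hbounds := pvZeros_mem_bounds M B
  refine Prod.ext ?_ (Prod.ext ?_ ?_)
  · -- C component
    simp only []
    rw [foldl_setD_const [ch] [] (pvZeros M B) C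
        (by intro i hi; have := hbounds i hi; exact ⟨this.1, by omega⟩)]
    unfold CmapP
    apply List.map_congr_left
    intro k hk
    simp only [mem_pvZeros B M (by omega) k]
    rw [← hM']
  · -- B component
    simp only []
    rw [foldl_setD_const (-1 : Int) 0 (pvZeros M B) B
        (by
          intro i hi
          have h1 := hbounds i hi
          exact ⟨h1.1, by omega⟩)]
    set B1map := (List.range B.length).map
      (fun (k : Nat) => if (k:Int) ∈ pvZeros M B then (-1:Int) else B.getD k 0) with hB1map
    have hB1len : B1map.length = B.length := by simp [hB1map]
    nth_rewrite 2 [hMM]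
    rw [foldl_pySetD_pointwise
        (f := fun i x => x - (((pvZeros M B).map (fun j => |i - j|)).sum)) 0 M' B1map (by omega)]
    unfold B2mapP SdistP
    simp only [hB1len]
    apply List.map_congr_left
    intro k hk
    have hkB : k < B.length := List.mem_range.mp hk
    have hB1k : B1map.getD k 0 = if ((k:Int) ∈ pvZeros M B) then (-1:Int) else B.getD k 0 := by
      rw [hB1map, PySem.List.getD_map_range _ _ _ _ hkB]
    have hsum : (((pvZeros M B).map (fun j => |(k:Int) - j|)).sum)
        = ((zrNP B M').map (fun (j : Nat) => |(k:Int) - (j:Int)|)).sum := by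
      rw [pvZeros_eq B M (by omega), List.map_map]
      rw [hM']
      rfl
    by_cases hkM : k < M'
    · rw [if_pos hkM, if_pos hkM]
      rw [hB1k, hsum]
      have hmem : ((k:Int) ∈ pvZeros M B) ↔ (k < M' ∧ zbP B k) := by
        rw [mem_pvZeros B M (by omega) k, hM']
      by_cases hzk : zbP B k
      · simp [hmem, hzk, hkM]
      · simp [hmem, hzk, hkM]
    · rw [if_neg hkM, if_neg hkM]
      rw [hB1k]
      have hnm : ¬ ((k:Int) ∈ pvZeros M B) := by
        rw [mem_pvZeros B M (by omega) k]
        exact fun hx => hkM hx.1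
      simp [hnm]
  · rfl

lemma roundB_eq (M : Int) (wc : PySem.Dict Char Int) (chars : List Char)
    (C : List (List Char)) (B : List Int) (si : Nat)
    (hM0 : 0 < M) (hBlen : M.toNat ≤ B.length) (hClen : M.toNat ≤ C.length) :
    roundB M wc chars C B si
    = (CmapP C B M.toNat (chars.getD (solveB_advance wc chars (((pvZeros M B).length : Int)) chars.length si) ' '),
       B2mapP B M.toNat,
       solveB_advance wc chars (((pvZeros M B).length : Int)) chars.length si + 1) := by
  simp only [roundB]
  rw [nf_eq M B]
  set M' := M.toNat with hM'
  have hMM : M = (M' : Int) := by omega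
  set siB := solveB_advance wc chars (((pvZeros M B).length : Int)) chars.length si with hsiB
  set ch := chars.getD siB ' ' with hch
  have hr1 : PySem.List.pyRange 0 M 1 = PySem.List.pyRange 0 (M' : Int) 1 := by rw [hMM]
  have hr2 : PySem.List.pyRange (M - 1) (-1) (-1) = PySem.List.pyRange ((M' : Int) - 1) (-1) (-1) := by rw [hMM]
  rw [hr1, hr2]
  rw [sweepL B M' M' le_rfl]
  simp only []
  set mapL := (List.range M').map
    (fun (k : Nat) => if k < M' then ZcP B (k+1) * k - ZsP B (k+1) else 0) with hmapL
  have hmapLlen : mapL.length = M' := by simp [hmapL]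
  have hsw := sweepR B M' M' le_rfl mapL (by omega)
  simp only [sub_self] at hsw
  rw [hsw]
  simp only []
  set addF := (List.range mapL.length).map
    (fun (k : Nat) => if k < M' then mapL.getD k 0 + ((ZsP B M' - ZsP B k) - (ZcP B M' - ZcP B k) * k) else mapL.getD k 0) with haddF
  have haddFv : ∀ k, k < M' → addF.getD k 0 = SdistP B M' k := by
    intro k hkM
    rw [haddF, PySem.List.getD_map_range _ _ _ _ (by omega)]
    rw [if_pos hkM]
    rw [hmapL, PySem.List.getD_map_range _ _ _ _ hkM, if_pos hkM]
    rw [SdistP, dist_sum B M' k hkM]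
  rw [foldl_CB B addF ch M' C (by omega) (by omega)]
  refine Prod.ext ?_ (Prod.ext ?_ ?_)
  · simp only []
    unfold CmapP
    rfl
  · simp only []
    unfold B2mapP
    apply List.map_congr_left
    intro k hk
    have hkB : k < B.length := List.mem_range.mp hk
    by_cases hkM : k < M'
    · rw [if_pos hkM, if_pos hkM, haddFv k hkM]
      by_cases hzk : zbP B k
      · simp [hzk]
      · simp [hzk]
    · rw [if_neg hkM, if_neg hkM]
  · rfl

lemma length_B2mapP (B : List Int) (M' : Nat) : (B2mapP B M').length = B.length := by
  simp [B2mapP]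

lemma length_CmapP (C : List (List Char)) (B : List Int) (M' : Nat) (ch : Char) :
    (CmapP C B M' ch).length = C.length := by
  simp [CmapP]

lemma loops_eq_gen (M : Int) (wc : PySem.Dict Char Int) (chars : List Char) :
    ∀ (fuel : Nat) (C : List (List Char)) (B : List Int) (si : Nat),
      M.toNat ≤ B.length → M.toNat ≤ C.length →
      solveA_loop M wc chars fuel C B si = solveB_loop M wc chars fuel C B si := by
  intro fuel
  induction fuel with
  | zero => intro C B si _ _; rfl
  | succ f ih =>
    intro C B si hB hC
    by_cases hz : (PySem.List.pyRange 0 M 1).filter (fun i => PySem.List.pyGetD B i 1 == 0) = []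
    · rw [stopA M wc chars f C B si hz, stopB M wc chars f C B si hz]
    · have hM0 : 0 < M := by
        obtain ⟨x, hx⟩ := List.exists_mem_of_ne_nil _ hz
        have h2 := pvZeros_mem_bounds M B x hx
        omega
      rw [stepA M wc chars f C B si hz, stepB M wc chars f C B si hz]
      rw [roundA_eq M wc chars C B si hM0 hB hC, roundB_eq M wc chars C B si hM0 hB hC]
      rw [advance_eq wc chars (((pvZeros M B).length : Int)) chars.length si]
      exact ih _ _ _ (by rw [length_B2mapP]; exact hB) (by rw [length_CmapP]; exact hC)

-- ===== VERDICT (by name: the statement is the Claim_ definition above) =====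
theorem solve_spec : Claim_equal_solve := by
  intro S M B _ hpre
  unfold Spec_solve
  show solve S M B = solve_alt S M B
  have hB : M.toNat ≤ B.length := by
    by_cases h : 0 ≤ M
    · have := hpre.1 h; omega
    · omega
  exact congrArg String.ofList (congrArg List.flatten
    (loops_eq_gen M (PySem.Dict.counter S.toList)
      (PySem.List.sorted (PySem.Set.ofList S.toList) (fun c => c) true)
      (M.toNat + 1) (List.replicate M.toNat ([] : List Char)) B 0 hB (by simp)))
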